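-- pv_equiv track=rewrite | github.com/Sidoine1991/KolaTradeboT | backend/weltrade_symbols.py | normalize_broker_symbol
-- ===== SOURCE A (Python) =====
-- from typing import Tuple
--
-- WELTRADE_BROKER_SUFFIXES: Tuple[str, ...] = (
--     ".pro",
--     ".ecn",
--     ".wt",
--     ".weltrade",
--     ".fix",
--     ".m",
--     ".i",
--     ".raw",
--     ".std",
--     ".cent",
-- )
--
-- def normalize_broker_symbol(symbol: str) -> str:
--     """Retire un suffixe broker du nom affiché MT5 (ex. EURUSD.pro → EURUSD)."""
--     s = (symbol or "").strip()
--     if not s: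
--         return ""
--     lower = s.lower()
--     for suf in WELTRADE_BROKER_SUFFIXES:
--         if lower.endswith(suf):
--             return s[: -len(suf)].upper().strip()
--     return s.upper().strip()
-- ===== SOURCE B (Python) =====
-- _WELTRADE_SUFFIX_TAILS = frozenset((
--     "pro", "ecn", "wt", "weltrade", "fix", "m", "i", "raw", "std", "cent",
-- ))
--
-- def normalize_broker_symbol(symbol: str) -> str:
--     """Retire un suffixe broker du nom affiché MT5 (ex. EURUSD.pro → EURUSD)."""
--     s = (symbol or "").strip()
--     if not s:
--         return ""
--     head, sep, tail = s.rpartition(".")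
--     if sep and tail.lower() in _WELTRADE_SUFFIX_TAILS:
--         return head.upper().strip()
--     return s.upper().strip()
-- ===== Notes on version B (the rewrite author's own statement) =====
-- stated objective: idiomatic
-- what changed: Replaces the linear endswith-scan over the 10-suffix tuple by one rpartition at the last dot extracting the trailing segment plus a single O(1) frozenset membership test on that segment.
import Mathlib
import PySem

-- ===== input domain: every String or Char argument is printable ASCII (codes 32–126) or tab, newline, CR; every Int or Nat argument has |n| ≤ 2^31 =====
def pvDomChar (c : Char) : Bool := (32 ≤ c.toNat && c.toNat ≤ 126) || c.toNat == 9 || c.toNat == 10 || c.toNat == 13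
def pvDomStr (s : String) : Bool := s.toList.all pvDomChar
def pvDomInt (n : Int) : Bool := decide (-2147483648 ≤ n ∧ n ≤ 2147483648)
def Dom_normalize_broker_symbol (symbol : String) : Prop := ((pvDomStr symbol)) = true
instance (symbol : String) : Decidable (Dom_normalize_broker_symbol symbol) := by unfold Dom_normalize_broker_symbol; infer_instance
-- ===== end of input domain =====

-- B replaces A's linear endswith-scan over the suffix tuple by one rpartition at the last dot extracting the
-- trailing dot-segment followed by a single membership test in a frozenset of suffix tails (idiomatic).

-- ===== PORT A =====
def WELTRADE_BROKER_SUFFIXES : List (List Char) :=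
  [".pro".toList, ".ecn".toList, ".wt".toList, ".weltrade".toList, ".fix".toList,
   ".m".toList, ".i".toList, ".raw".toList, ".std".toList, ".cent".toList]

-- the for-loop over the suffix tuple: the first suffix `lower` ends with wins
def pvLoopA (s low : List Char) : List (List Char) → List Char
  | [] => PySem.Chars.strip (PySem.Chars.upper s)
  | suf :: rest =>
      if PySem.Chars.endswith low suf then
        PySem.Chars.strip (PySem.Chars.upper (PySem.List.slice s none (some (-(suf.length : Int)))))
      else pvLoopA s low rest

def normalize_broker_symbol (symbol : String) : String :=
  let s := PySem.Chars.strip symbol.toList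
  if s = [] then ""
  else String.ofList (pvLoopA s (PySem.Chars.lower s) WELTRADE_BROKER_SUFFIXES)

-- ===== PORT B =====
-- the frozenset of suffix tails (without the leading dot)
def pvSuffixTails : PySem.Set (List Char) :=
  PySem.Set.ofList
    ["pro".toList, "ecn".toList, "wt".toList, "weltrade".toList, "fix".toList,
     "m".toList, "i".toList, "raw".toList, "std".toList, "cent".toList]

-- "not the separator" predicate used to locate the last '.' of the string
def pvNotDot (c : Char) : Bool := c ≠ '.'

-- s.rpartition('.') : (head, sep-found?, tail); Python returns ("", "", s) when '.' is absent
def pvRPartitionDot (s : List Char) : List Char × Bool × List Char :=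
  let tl := s.reverse.takeWhile pvNotDot
  if tl.length = s.length then ([], false, s)
  else (s.take (s.length - tl.length - 1), true, tl.reverse)

def normalize_broker_symbol_alt (symbol : String) : String :=
  let s := PySem.Chars.strip symbol.toList
  if s = [] then ""
  else
    let r := pvRPartitionDot s
    if r.2.1 && decide (PySem.Chars.lower r.2.2 ∈ pvSuffixTails) then
      String.ofList (PySem.Chars.strip (PySem.Chars.upper r.1))
    else String.ofList (PySem.Chars.strip (PySem.Chars.upper s))

-- ===== PRECONDITION & SPEC =====
def Spec_normalize_broker_symbol (symbol : String) (out : String) : Prop := out = normalize_broker_symbol_alt symbol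
instance (symbol : String) (out : String) : Decidable (Spec_normalize_broker_symbol symbol out) := by unfold Spec_normalize_broker_symbol; infer_instance

-- ===== CLAIM (what is proved, stated in full; the proofs are below) =====
def Claim_equal_normalize_broker_symbol : Prop := ∀ (symbol : String), Dom_normalize_broker_symbol symbol → Spec_normalize_broker_symbol symbol (normalize_broker_symbol symbol)

-- ===== LEMMAS AND PROOFS =====

theorem pvLowerChar_eq_dot_iff (c : Char) : (PySem.Chars.lowerChar c = '.') ↔ c = '.' := by
  unfold PySem.Chars.lowerChar PySem.Chars.isupper
  split_ifs with h
  · simp only [Bool.and_eq_true, decide_eq_true_eq] at h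
    have hb : 65 ≤ c.toNat ∧ c.toNat ≤ 90 := by
      obtain ⟨h1, h2⟩ := h
      rw [Char.le_def] at h1 h2
      exact ⟨h1, h2⟩
    constructor
    · intro he
      have h3 : (Char.ofNat (c.toNat + 32)).toNat = ('.' : Char).toNat := by rw [he]
      rw [Char.toNat_ofNat] at h3
      have hv : (c.toNat + 32).isValidChar := by unfold Nat.isValidChar; left; omega
      rw [if_pos hv] at h3
      exact absurd h3 (by simp; omega)
    · rintro rfl; exact absurd hb.1 (by decide)
  · exact Iff.rfl

theorem pvDot_mem_lower (s : List Char) : '.' ∈ PySem.Chars.lower s ↔ '.' ∈ s := by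
  unfold PySem.Chars.lower
  rw [List.mem_map]
  constructor
  · rintro ⟨c, hc, he⟩
    rw [pvLowerChar_eq_dot_iff] at he
    exact he ▸ hc
  · intro h; exact ⟨'.', h, by decide⟩

theorem pvPrefix_dotfree (u v w : List Char) (hu : '.' ∉ u) (hv : '.' ∉ v) :
    (u ++ ['.'] <+: v ++ '.' :: w) ↔ u = v := by
  induction u generalizing v with
  | nil =>
    cases v with
    | nil => simp
    | cons c v' =>
      simp only [List.nil_append, List.cons_append, List.cons_prefix_cons]
      constructor
      · rintro ⟨rfl, -⟩; exact absurd (List.mem_cons_self) hv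
      · intro h; exact absurd h (by simp)
  | cons a u' ih =>
    cases v with
    | nil =>
      simp only [List.cons_append, List.nil_append, List.cons_prefix_cons]
      constructor
      · rintro ⟨rfl, -⟩; exact absurd (List.mem_cons_self) hu
      · intro h; exact absurd h (by simp)
    | cons c v' =>
      simp only [List.cons_append, List.cons_prefix_cons]
      rw [ih v' (fun h => hu (List.mem_cons_of_mem _ h)) (fun h => hv (List.mem_cons_of_mem _ h))]
      constructor
      · rintro ⟨rfl, rfl⟩; rfl
      · intro h; cases h; exact ⟨rfl, rfl⟩

theorem pvEndswith_dot_iff (s tl rest t : List Char) (hrev : s.reverse = tl ++ '.' :: rest)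
    (htl : '.' ∉ tl) (ht : '.' ∉ t) :
    PySem.Chars.endswith (PySem.Chars.lower s) ('.' :: t) = true ↔ t = PySem.Chars.lower tl.reverse := by
  rw [PySem.Chars.endswith_iff, ← List.reverse_prefix]
  have hlow : (PySem.Chars.lower s).reverse =
      List.map PySem.Chars.lowerChar tl ++ '.' :: List.map PySem.Chars.lowerChar rest := by
    unfold PySem.Chars.lower
    rw [← List.map_reverse, hrev]
    simp [List.map_append]
    decide
  rw [hlow]
  have hrevp : ('.' :: t).reverse = t.reverse ++ ['.'] := by simp
  rw [hrevp]
  rw [pvPrefix_dotfree _ _ _ (by simpa using ht)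
      (by intro hm; obtain ⟨c, hc, he⟩ := List.mem_map.mp hm
          rw [pvLowerChar_eq_dot_iff] at he; exact htl (he ▸ hc))]
  unfold PySem.Chars.lower
  rw [List.map_reverse]
  exact List.reverse_eq_iff

theorem pvSlice_neg (s : List Char) (k : Nat) (hk0 : 0 < k) (hk : k ≤ s.length) :
    PySem.List.slice s none (some (-(k : Int))) = s.take (s.length - k) := by
  unfold PySem.List.slice PySem.List.clampIdx
  simp only
  rw [if_pos (by omega : (-(k:Int)) < 0), if_neg (by omega : ¬ ((s.length : Int) + -(k:Int) < 0))]
  simp only [List.drop_zero, Nat.sub_zero]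
  congr 1
  omega

theorem pvLoopA_nomatch (s low : List Char) (ts : List (List Char))
    (h : ∀ suf ∈ ts, PySem.Chars.endswith low suf = false) :
    pvLoopA s low ts = PySem.Chars.strip (PySem.Chars.upper s) := by
  induction ts with
  | nil => rfl
  | cons suf rest ih =>
    unfold pvLoopA
    rw [if_neg (by simp [h suf List.mem_cons_self])]
    exact ih (fun x hx => h x (List.mem_cons_of_mem _ hx))

theorem pvLoopA_dot (s tl rest : List Char)
    (hrev : s.reverse = tl ++ '.' :: rest) (htl : '.' ∉ tl)
    (ts : List (List Char)) (hts : ∀ t ∈ ts, '.' ∉ t) :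
    pvLoopA s (PySem.Chars.lower s) (ts.map (fun t => '.' :: t)) =
    if PySem.Chars.lower tl.reverse ∈ ts then
      PySem.Chars.strip (PySem.Chars.upper (s.take (s.length - tl.length - 1)))
    else PySem.Chars.strip (PySem.Chars.upper s) := by
  have hlen : tl.length + 1 ≤ s.length := by
    have := congrArg List.length hrev
    rw [List.length_reverse, List.length_append, List.length_cons] at this
    omega
  induction ts with
  | nil =>
    rw [List.map_nil, if_neg (by simp)]
    rfl
  | cons t ts' ih =>
    have ht : '.' ∉ t := hts t List.mem_cons_self
    rw [List.map_cons]
    unfold pvLoopA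
    by_cases hend : PySem.Chars.endswith (PySem.Chars.lower s) ('.' :: t) = true
    · rw [if_pos hend]
      have heq : t = PySem.Chars.lower tl.reverse := (pvEndswith_dot_iff s tl rest t hrev htl ht).mp hend
      have hlent : t.length = tl.length := by
        rw [heq]; simp [PySem.Chars.lower]
      rw [if_pos (by rw [← heq]; exact List.mem_cons_self)]
      have harg : ((('.' :: t).length : Nat) : Int) = ((tl.length + 1 : Nat) : Int) := by
        simp [hlent]
      rw [harg, pvSlice_neg s (tl.length + 1) (by omega) hlen]
      congr 2
    · rw [if_neg hend]
      have hne : PySem.Chars.lower tl.reverse ≠ t := by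
        intro h
        exact hend ((pvEndswith_dot_iff s tl rest t hrev htl ht).mpr h.symm)
      rw [ih (fun x hx => hts x (List.mem_cons_of_mem _ hx))]
      by_cases hm : PySem.Chars.lower tl.reverse ∈ ts'
      · rw [if_pos hm, if_pos (List.mem_cons_of_mem _ hm)]
      · rw [if_neg hm, if_neg (by simp [List.mem_cons, hm]; exact hne)]

theorem pvRPartitionDot_nodot (s : List Char) (hdot : '.' ∉ s) :
    pvRPartitionDot s = ([], false, s) := by
  unfold pvRPartitionDot
  have htk : s.reverse.takeWhile pvNotDot = s.reverse := by
    rw [List.takeWhile_eq_self_iff]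
    intro c hc
    simp only [pvNotDot, ne_eq, decide_eq_true_eq]
    rintro rfl
    exact hdot (List.mem_reverse.mp hc)
  rw [htk, if_pos (List.length_reverse)]

theorem pvRev_decomp (s : List Char) (hdot : '.' ∈ s) :
    s.reverse = s.reverse.takeWhile pvNotDot ++ '.' :: (s.reverse.dropWhile pvNotDot).tail := by
  have hdw : s.reverse.dropWhile pvNotDot ≠ [] := by
    intro h
    have htk : s.reverse.takeWhile pvNotDot = s.reverse := by
      conv_rhs => rw [← List.takeWhile_append_dropWhile (p := pvNotDot) (l := s.reverse), h]
      rw [List.append_nil]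
    have hmem : ('.' : Char) ∈ s.reverse.takeWhile pvNotDot := by
      rw [htk]; exact List.mem_reverse.mpr hdot
    have := List.mem_takeWhile_imp hmem
    simp [pvNotDot] at this
  have hhead : (s.reverse.dropWhile pvNotDot).head hdw = '.' := by
    have := List.head_dropWhile_not (p := pvNotDot) (l := s.reverse) hdw
    simpa [pvNotDot] using this
  conv_lhs => rw [← List.takeWhile_append_dropWhile (p := pvNotDot) (l := s.reverse)]
  congr 1
  rw [← hhead]
  exact (List.cons_head_tail hdw).symm

theorem pvTl_lt (s : List Char) (hdot : '.' ∈ s) :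
    (s.reverse.takeWhile pvNotDot).length < s.length := by
  have := congrArg List.length (pvRev_decomp s hdot)
  rw [List.length_reverse, List.length_append, List.length_cons] at this
  omega

theorem pvRPartitionDot_dot (s : List Char) (hdot : '.' ∈ s) :
    pvRPartitionDot s =
      (s.take (s.length - (s.reverse.takeWhile pvNotDot).length - 1), true,
       (s.reverse.takeWhile pvNotDot).reverse) := by
  unfold pvRPartitionDot
  rw [if_neg (by have := pvTl_lt s hdot; omega)]

theorem pvCore (s : List Char) :
    pvLoopA s (PySem.Chars.lower s) WELTRADE_BROKER_SUFFIXES =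
    (if (pvRPartitionDot s).2.1 && decide (PySem.Chars.lower (pvRPartitionDot s).2.2 ∈ pvSuffixTails) then
       PySem.Chars.strip (PySem.Chars.upper (pvRPartitionDot s).1)
     else PySem.Chars.strip (PySem.Chars.upper s)) := by
  have hSUF : WELTRADE_BROKER_SUFFIXES =
      (["pro".toList, "ecn".toList, "wt".toList, "weltrade".toList, "fix".toList,
        "m".toList, "i".toList, "raw".toList, "std".toList, "cent".toList]).map (fun t => '.' :: t) := by
    decide
  have hTails : pvSuffixTails =
      ["pro".toList, "ecn".toList, "wt".toList, "weltrade".toList, "fix".toList,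
       "m".toList, "i".toList, "raw".toList, "std".toList, "cent".toList] := by
    decide
  by_cases hdot : '.' ∈ s
  · -- the last dot splits s; both sides work with the segment after it
    have hrev := pvRev_decomp s hdot
    have htlf : '.' ∉ s.reverse.takeWhile pvNotDot := by
      intro h
      have := List.mem_takeWhile_imp h
      simp [pvNotDot] at this
    rw [hSUF, pvLoopA_dot s _ _ hrev htlf _ (by decide), pvRPartitionDot_dot s hdot]
    simp only [Bool.true_and]
    rw [hTails]
    by_cases hm : PySem.Chars.lower (s.reverse.takeWhile pvNotDot).reverse ∈
        ["pro".toList, "ecn".toList, "wt".toList, "weltrade".toList, "fix".toList,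
         "m".toList, "i".toList, "raw".toList, "std".toList, "cent".toList]
    · rw [if_pos hm, if_pos (by simpa using hm)]
    · rw [if_neg hm, if_neg (by simpa using hm)]
  · -- no dot anywhere: A's scan matches nothing, B's rpartition finds no separator
    rw [pvLoopA_nomatch s _ WELTRADE_BROKER_SUFFIXES (by
      intro suf hsuf
      have hdotsuf : '.' ∈ suf := by fin_cases hsuf <;> decide
      rw [Bool.eq_false_iff]
      intro he
      have hsfx := (PySem.Chars.endswith_iff _ _).mp he
      exact hdot ((pvDot_mem_lower s).mp (hsfx.subset hdotsuf)))]
    rw [pvRPartitionDot_nodot s hdot]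
    simp

-- ===== VERDICT (by name: the statement is the Claim_ definition above) =====
theorem normalize_broker_symbol_spec : Claim_equal_normalize_broker_symbol := by
  intro symbol _
  unfold Spec_normalize_broker_symbol normalize_broker_symbol normalize_broker_symbol_alt
  simp only
  by_cases hs : PySem.Chars.strip symbol.toList = []
  · rw [if_pos hs, if_pos hs]
  · rw [if_neg hs, if_neg hs]
    rw [pvCore]
    split_ifs <;> rfl
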